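-- pv_equiv track=rewrite | github.com/openags/OpenAGS | openags/research/tools/pdf_parser.py | _extract_abstract
-- ===== SOURCE A (Python) =====
-- def _extract_abstract(text: str) -> str:
--     """Heuristic extraction of abstract section."""
--     lower = text.lower()
--     abs_start = lower.find("abstract")
--     if abs_start == -1:
--         return ""
--
--     abs_start += len("abstract")
--     # Skip whitespace and newlines after "abstract"
--     while abs_start < len(text) and text[abs_start] in " \n\r\t.—:":
--         abs_start += 1
--
--     # Find the end — typically "Introduction", "1.", or double newline
--     intro_markers = ["introduction", "\n1.", "\n1 "]
--     abs_end = len(text)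
--     for marker in intro_markers:
--         idx = lower.find(marker, abs_start)
--         if idx != -1 and idx < abs_end:
--             abs_end = idx
--
--     # Cap at reasonable length
--     abs_end = min(abs_end, abs_start + 3000)
--     return text[abs_start:abs_end].strip()
-- ===== SOURCE B (Python) =====
-- def _extract_abstract(text: str) -> str:
--     """Heuristic extraction of abstract section."""
--     lower = text.lower()
--     start = lower.find("abstract")
--     if start == -1:
--         return ""
--     start += len("abstract")
--     # Skip separator chars by stripping them off the left of the tail
--     tail = text[start:]
--     start += len(tail) - len(tail.lstrip(" \n\r\t.—:"))
--     # Single left-to-right scan for the earliest end marker, capped at 3000 chars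
--     cap = min(len(text), start + 3000)
--     end = cap
--     for j in range(start, cap):
--         if lower.startswith(("introduction", "\n1.", "\n1 "), j):
--             end = j
--             break
--     return text[start:end].strip()
-- ===== Notes on version B (the rewrite author's own statement) =====
-- stated objective: alternative
-- what changed: A's three independent full-string find scans with min-index bookkeeping are replaced by one bounded left-to-right scan that stops at the first end-marker position inside the 3000-char cap, and the whitespace-skip while loop by an lstrip-based length computation
import Mathlib
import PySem

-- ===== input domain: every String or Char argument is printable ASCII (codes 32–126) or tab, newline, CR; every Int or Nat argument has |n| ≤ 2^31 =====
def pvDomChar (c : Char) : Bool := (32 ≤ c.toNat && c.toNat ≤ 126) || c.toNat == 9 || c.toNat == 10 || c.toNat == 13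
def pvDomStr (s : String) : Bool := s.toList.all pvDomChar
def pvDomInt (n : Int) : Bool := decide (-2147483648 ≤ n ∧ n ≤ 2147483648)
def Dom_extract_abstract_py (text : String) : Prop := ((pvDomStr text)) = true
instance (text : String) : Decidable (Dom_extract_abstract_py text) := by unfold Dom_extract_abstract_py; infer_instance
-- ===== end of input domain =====

-- B replaces A's three full find scans plus min-bookkeeping by one bounded left-to-right scan
-- stopping at the first end-marker inside the 3000-char cap (objective: alternative, same cost).

-- the separator characters skipped after "abstract" (Python: `in " \n\r\t.—:"`)
def pvJunk : List Char := " \n\r\t.—:".toList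

-- ===== PORT A =====
-- the `while abs_start < len(text) and text[abs_start] in " \n\r\t.—:": abs_start += 1` loop
def pvSkipA (s : List Char) (i : Nat) : Nat :=
  if h : i < s.length then
    if pvJunk.contains s[i] then pvSkipA s (i + 1) else i
  else i
termination_by s.length - i

def extract_abstract_py (text : String) : String :=
  let s := text.toList
  let lower := PySem.Chars.lower s
  let absStart0 := PySem.Chars.find lower "abstract".toList
  if absStart0 = -1 then ""
  else
    let i := pvSkipA s (absStart0 + 8).toNat
    -- for marker in intro_markers: idx = lower.find(marker, abs_start); if idx != -1 and idx < abs_end: abs_end = idx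
    let absEnd := ["introduction".toList, "\n1.".toList, "\n1 ".toList].foldl
      (fun e m =>
        let idx := PySem.Chars.findFrom lower m (i : Int)
        if idx ≠ -1 ∧ idx < e then idx else e) ((s.length : Int))
    let absEnd := min absEnd ((i : Int) + 3000)
    String.ofList (PySem.Chars.strip (PySem.Chars.slice s (some (i : Int)) (some absEnd)))

-- ===== PORT B =====
-- `lower.startswith(("introduction", "\n1.", "\n1 "), j)` (startswith at offset j = prefix of the drop)
def pvMatchAt (lower : List Char) (j : Nat) : Bool :=
  PySem.Chars.startswith (lower.drop j) "introduction".toList ||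
  PySem.Chars.startswith (lower.drop j) "\n1.".toList ||
  PySem.Chars.startswith (lower.drop j) "\n1 ".toList

-- `for j in range(start, cap): if lower.startswith(..., j): end = j; break` (else end = cap)
def pvScan (lower : List Char) (j cap : Nat) : Nat :=
  if j < cap then
    if pvMatchAt lower j then j else pvScan lower (j + 1) cap
  else cap
termination_by cap - j

def extract_abstract_py_alt (text : String) : String :=
  let s := text.toList
  let lower := PySem.Chars.lower s
  let f := PySem.Chars.find lower "abstract".toList
  if f = -1 then ""
  else
    let start0 := (f + 8).toNat
    let tail := s.drop start0
    -- `tail.lstrip(" \n\r\t.—:")` drops exactly the leading chars of the set (exact port by hand)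
    let start := start0 + (tail.length - (tail.dropWhile (fun c => pvJunk.contains c)).length)
    let cap := min s.length (start + 3000)
    let e := pvScan lower start cap
    String.ofList (PySem.Chars.strip (PySem.Chars.slice s (some (start : Int)) (some (e : Int))))

-- ===== PRECONDITION & SPEC =====
def Spec_extract_abstract_py (text : String) (out : String) : Prop := out = extract_abstract_py_alt text
instance (text : String) (out : String) : Decidable (Spec_extract_abstract_py text out) := by unfold Spec_extract_abstract_py; infer_instance

-- ===== CLAIM (what is proved, stated in full; the proofs are below) =====
def Claim_equal_extract_abstract_py : Prop := ∀ (text : String), Dom_extract_abstract_py text → Spec_extract_abstract_py text (extract_abstract_py text)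

-- ===== LEMMAS AND PROOFS =====

-- A's whitespace-skip loop equals B's lstrip-based arithmetic
theorem pvSkipA_eq (s : List Char) (i : Nat) :
    pvSkipA s i = i + ((s.drop i).length - ((s.drop i).dropWhile (fun c => pvJunk.contains c)).length) := by
  fun_induction pvSkipA s i with
  | case1 i h hc ih =>
    rw [ih, List.drop_eq_getElem_cons h]
    simp only [List.dropWhile_cons, hc, if_true, List.length_cons]
    have := List.length_dropWhile_le (fun c => pvJunk.contains c) (s.drop (i + 1))
    omega
  | case2 i h hc =>
    rw [List.drop_eq_getElem_cons h]
    simp only [List.dropWhile_cons, hc, Bool.false_eq_true, if_false, List.length_cons]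
    omega
  | case3 i h =>
    rw [List.drop_eq_nil_of_le (by omega)]
    simp

-- invariant carried by A's min-tracking fold over the markers
def pvSpecE (L : List Char) (ms : List (List Char)) (i : Nat) (e : Int) : Prop :=
  (i : Int) ≤ e ∧ e ≤ L.length ∧
  (e < L.length → ∃ m ∈ ms, m <+: L.drop e.toNat) ∧
  (∀ j : Nat, i ≤ j → (j : Int) < e → ∀ m ∈ ms, ¬ m <+: L.drop j)

theorem pvDropDrop (L : List Char) (i d : Nat) : (L.drop i).drop d = L.drop (i + d) := by
  rw [List.drop_drop]

theorem pvInfix_of_prefix_drop (L m : List Char) (i j : Nat) (hij : i ≤ j)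
    (hp : m <+: L.drop j) : m <:+: L.drop i := by
  have h5 : m <+: (L.drop i).drop (j - i) := by
    rw [pvDropDrop, show i + (j - i) = j by omega]; exact hp
  exact (PySem.Chars.isIn_iff_infix _ _).1
    ((PySem.Chars.exists_prefix_drop_iff_isIn m (L.drop i)).1 ⟨_, h5⟩)

theorem pvStep (L m : List Char) (ms : List (List Char)) (i : Nat) (hi : i ≤ L.length)
    (e : Int) (h : pvSpecE L ms i e) :
    pvSpecE L (ms ++ [m]) i
      (if PySem.Chars.findFrom L m (i : Int) ≠ -1 ∧ PySem.Chars.findFrom L m (i : Int) < e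
       then PySem.Chars.findFrom L m (i : Int) else e) := by
  obtain ⟨h1, h2, h3, h4⟩ := h
  have hdlen : (L.drop i).length = L.length - i := List.length_drop
  rw [PySem.Chars.findFrom_natCast L m i hi]
  by_cases hneg : PySem.Chars.find (L.drop i) m = -1
  · rw [if_pos hneg]
    rw [if_neg (by simp)]
    refine ⟨h1, h2, fun hlt => ?_, fun j hij hje m' hm' => ?_⟩
    · obtain ⟨m', hm', hp⟩ := h3 hlt; exact ⟨m', by simp [hm'], hp⟩
    · rcases List.mem_append.1 hm' with hin | hin
      · exact h4 j hij hje m' hin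
      · simp only [List.mem_singleton] at hin; subst hin
        intro hp
        exact (PySem.Chars.find_eq_neg_one_iff _ _).1 hneg (pvInfix_of_prefix_drop L m' i j hij hp)
  · rw [if_neg hneg]
    set g := PySem.Chars.find (L.drop i) m with hg
    have hge : 0 ≤ g := by have := PySem.Chars.neg_one_le_find (L.drop i) m; omega
    have hspec := PySem.Chars.find_spec (s := L.drop i) (sub := m) hge
    have hlen : g ≤ ((L.drop i).length : Int) := PySem.Chars.find_le_length _ _
    have hnomatch : ∀ j : Nat, i ≤ j → (j : Int) < ↑i + g → ¬ m <+: L.drop j := by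
      intro j hij hje hp
      have := hspec.2 (j - i) (by omega)
      rw [pvDropDrop, show i + (j - i) = j by omega] at this
      exact this hp
    by_cases hlt : (↑i + g : Int) < e
    · rw [if_pos ⟨by omega, hlt⟩]
      refine ⟨by omega, by push_cast [hdlen] at hlen ⊢; omega, fun _ => ?_, ?_⟩
      · refine ⟨m, by simp, ?_⟩
        have hpre := hspec.1
        rw [pvDropDrop] at hpre
        rwa [show ((↑i + g : Int)).toNat = i + g.toNat by omega]
      · intro j hij hje m' hm'
        rcases List.mem_append.1 hm' with hin | hin
        · exact h4 j hij (by omega) m' hin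
        · simp only [List.mem_singleton] at hin; subst hin
          exact hnomatch j hij hje
    · rw [if_neg (by tauto)]
      refine ⟨h1, h2, fun hlt' => ?_, fun j hij hje m' hm' => ?_⟩
      · obtain ⟨m', hm', hp⟩ := h3 hlt'; exact ⟨m', by simp [hm'], hp⟩
      · rcases List.mem_append.1 hm' with hin | hin
        · exact h4 j hij hje m' hin
        · simp only [List.mem_singleton] at hin; subst hin
          intro hp
          by_cases hj : (j : Int) < ↑i + g
          · exact hnomatch j hij hj hp
          · omega

-- B's scan: first match position in [j, cap), else cap
theorem pvScan_spec (L : List Char) (cap j : Nat) (hj : j ≤ cap) :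
    j ≤ pvScan L j cap ∧ pvScan L j cap ≤ cap ∧
    (pvScan L j cap < cap → pvMatchAt L (pvScan L j cap) = true) ∧
    (∀ k, j ≤ k → k < pvScan L j cap → pvMatchAt L k = false) := by
  fun_induction pvScan L j cap with
  | case1 j h hm =>
    exact ⟨le_refl _, by omega, fun _ => hm, fun k hk1 hk2 => by omega⟩
  | case2 j h hm ih =>
    obtain ⟨a, b, c, d⟩ := ih (by omega)
    refine ⟨by omega, b, c, fun k hk1 hk2 => ?_⟩
    rcases Nat.eq_or_lt_of_le hk1 with rfl | hlt
    · simpa using hm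
    · exact d k hlt hk2
  | case3 j h =>
    exact ⟨hj, le_refl _, by omega, fun k hk1 hk2 => by omega⟩

theorem pvMatchAt_iff (L : List Char) (j : Nat) :
    pvMatchAt L j = true ↔
      ∃ m ∈ [("introduction".toList : List Char), "\n1.".toList, "\n1 ".toList], m <+: L.drop j := by
  simp [pvMatchAt, PySem.Chars.startswith_iff, or_assoc]

theorem pvEndEq (L : List Char) (slen i : Nat) (E : Int)
    (hLs : L.length = slen) (hi : i ≤ slen)
    (hspec : pvSpecE L [("introduction".toList : List Char), "\n1.".toList, "\n1 ".toList] i E) :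
    min E ((i : Int) + 3000) = ((pvScan L i (min slen (i + 3000)) : Nat) : Int) := by
  obtain ⟨e1, e2, e3, e4⟩ := hspec
  rw [hLs] at e2 e3
  obtain ⟨b1, b2, b3, b4⟩ := pvScan_spec L (min slen (i + 3000)) i (by omega)
  set cap := min slen (i + 3000) with hcap
  set b := pvScan L i cap with hb
  by_cases hbc : b < cap
  · obtain ⟨m, hm, hp⟩ := (pvMatchAt_iff L b).1 (b3 hbc)
    have hEleb : E ≤ (b : Int) := by
      by_contra hc
      push Not at hc
      exact e4 b b1 hc m hm hp
    have hbleE : (b : Int) ≤ E := by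
      by_contra hc
      push Not at hc
      have hElt : E < (slen : Int) := by omega
      obtain ⟨m', hm', hp'⟩ := e3 hElt
      have hfalse := b4 E.toNat (by omega) (by omega)
      have htrue := (pvMatchAt_iff L E.toNat).2 ⟨m', hm', hp'⟩
      rw [htrue] at hfalse
      cases hfalse
    omega
  · have hbcap : b = cap := by omega
    have hEcap : (cap : Int) ≤ E := by
      by_contra hc
      push Not at hc
      have hElt : E < (slen : Int) := by omega
      obtain ⟨m', hm', hp'⟩ := e3 hElt
      have hfalse := b4 E.toNat (by omega) (by omega)
      have htrue := (pvMatchAt_iff L E.toNat).2 ⟨m', hm', hp'⟩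
      rw [htrue] at hfalse
      cases hfalse
    omega

-- ===== VERDICT (by name: the statement is the Claim_ definition above) =====
theorem extract_abstract_py_spec : Claim_equal_extract_abstract_py := by
  intro text _
  show extract_abstract_py text = extract_abstract_py_alt text
  simp only [extract_abstract_py, extract_abstract_py_alt, List.foldl_cons, List.foldl_nil]
  set s := text.toList with hs
  set L := PySem.Chars.lower s with hL
  set f := PySem.Chars.find L "abstract".toList with hf
  by_cases hneg : f = -1
  · rw [if_pos hneg, if_pos hneg]
  · rw [if_neg hneg, if_neg hneg]
    rw [← pvSkipA_eq s ((f + 8).toNat)]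
    have hLlen : L.length = s.length := by rw [hL]; simp [PySem.Chars.lower]
    have hf0 : 0 ≤ f := by have := PySem.Chars.neg_one_le_find L "abstract".toList; omega
    have hi0 : (f + 8).toNat ≤ s.length := by
      have hpre := (PySem.Chars.find_spec (s := L) (sub := "abstract".toList) hf0).1
      have hll := hpre.length_le
      simp only [List.length_drop] at hll
      have h8 : ("abstract".toList).length = 8 := by decide
      omega
    set i := pvSkipA s ((f + 8).toNat) with hi
    have hile : i ≤ s.length := by
      rw [hi, pvSkipA_eq]
      have := List.length_dropWhile_le (fun c => pvJunk.contains c) (s.drop ((f + 8).toNat))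
      simp only [List.length_drop] at *
      omega
    have hiL : i ≤ L.length := by omega
    have st0 : pvSpecE L [] i ((s.length : Int)) :=
      ⟨by exact_mod_cast hile, by omega, by omega, by simp⟩
    have st1 := pvStep L "introduction".toList [] i hiL _ st0
    have st2 := pvStep L "\n1.".toList _ i hiL _ st1
    have st3 := pvStep L "\n1 ".toList _ i hiL _ st2
    simp only [List.nil_append, List.cons_append] at st3
    rw [pvEndEq L s.length i _ hLlen hile st3]
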